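-- pv_equiv track=rewrite | github.com/theoricline/klein-bottle-qec | kbcode/core.py | predicted_pattern
-- ===== SOURCE A (Python) =====
-- def h(x, y, Lx):
--     """Horizontal edge index at position (x, y)."""
--     return y * Lx + (x % Lx)
--
-- def v(x, y, Lx, Ly):
--     """Vertical edge index at position (x, y)."""
--     return Lx * Ly + (y % Ly) * Lx + (x % Lx)
--
-- def vi(x, y, Lx):
--     """Syndrome qubit (vertex) index at position (x, y)."""
--     return y * Lx + (x % Lx)
--
-- def klein_star(x, y, Lx, Ly, delta=0):
--     """
--     Star operator for the Klein bottle code with shift δ.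
--
--     At y=0: the downward edge connects to the antipodal vertex
--       ((Lx-1-x+delta) % Lx, Ly-1) — the orientation-reversing
--       identification of the Klein bottle.
--     At y>0: standard periodic downward edge.
--
--     delta=0 gives the standard Klein bottle code (Paper 1).
--     delta=1,2,3 give the δ-family members (Paper 2).
--     """
--     edges = [h(x, y, Lx), h(x-1, y, Lx), v(x, y, Lx, Ly)]
--     if y == 0:
--         anti_x = (Lx - 1 - x + delta) % Lx
--         edges.append(v(anti_x, Ly-1, Lx, Ly))
--     else:
--         edges.append(v(x, y-1, Lx, Ly))
--     return list(set(edges))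
--
-- def predicted_pattern(Lx, Ly, delta=0):
--     """
--     Predict the dominant syndrome pattern for the b-anyon
--     prepared state in C(delta).
--
--     The b-anyon preparation flips the antipodal edge at vertex (0,0).
--     The pattern is determined entirely by circuit wiring — it is
--     topologically protected against local quantum errors.
--
--     Returns:
--         pattern:   8-bit string e.g. '10000001'
--         firing:    list of syndrome qubit indices that fire
--         prep_edge: data qubit index used for b-anyon preparation
--     """
--     anti_x    = (Lx - 1 - 0 + delta) % Lx
--     prep_edge = v(anti_x, Ly-1, Lx, Ly)
--
--     firing = []
--     for y in range(Ly):
--         for x in range(Lx):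
--             if prep_edge in klein_star(x, y, Lx, Ly, delta):
--                 firing.append(vi(x, y, Lx))
--
--     bits    = [0] * (Lx * Ly)
--     for idx in firing:
--         bits[idx] = 1
--     pattern = ''.join(str(b) for b in reversed(bits))
--     return pattern, sorted(firing), prep_edge
-- ===== SOURCE B (Python) =====
-- def v(x, y, Lx, Ly):
--     """Vertical edge index at position (x, y)."""
--     return Lx * Ly + (y % Ly) * Lx + (x % Lx)
--
-- def predicted_pattern(Lx, Ly, delta=0):
--     """Closed-form version: only vertex (0,0) (antipodal branch at y=0)
--     and vertex (anti_x, Ly-1) (its own up-edge) can see the prep edge."""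
--     anti_x    = (Lx - 1 + delta) % Lx
--     prep_edge = v(anti_x, Ly - 1, Lx, Ly)
--
--     if Lx >= 1 and Ly >= 1:
--         firing = sorted({0, (Ly - 1) * Lx + anti_x})
--     else:
--         firing = []
--
--     bits = [0] * (Lx * Ly)
--     for idx in firing:
--         bits[idx] = 1
--     pattern = ''.join(str(b) for b in reversed(bits))
--     return pattern, firing, prep_edge
-- ===== Notes on version B (the rewrite author's own statement) =====
-- stated objective: faster
-- what changed: B replaces A's scan of all Lx*Ly vertices (each building a klein_star edge set and testing membership) by the analytic closed-form firing set {vertex 0, vertex (Ly-1)*Lx + anti_x}, deduplicated with a set when the two coincide.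
import Mathlib
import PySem

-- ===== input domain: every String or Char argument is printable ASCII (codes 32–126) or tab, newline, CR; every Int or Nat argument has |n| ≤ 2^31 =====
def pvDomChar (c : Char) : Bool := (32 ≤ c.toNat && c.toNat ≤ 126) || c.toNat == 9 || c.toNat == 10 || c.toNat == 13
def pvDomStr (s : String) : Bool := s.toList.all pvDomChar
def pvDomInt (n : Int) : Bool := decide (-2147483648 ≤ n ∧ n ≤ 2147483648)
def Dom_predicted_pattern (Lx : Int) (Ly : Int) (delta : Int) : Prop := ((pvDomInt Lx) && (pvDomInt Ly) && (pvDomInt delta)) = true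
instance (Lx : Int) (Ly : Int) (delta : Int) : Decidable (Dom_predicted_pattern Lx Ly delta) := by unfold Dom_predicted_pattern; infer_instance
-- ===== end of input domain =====

-- B replaces A's scan of all Lx*Ly vertices by the closed-form firing set
-- {vertex (0,0), vertex (anti_x, Ly-1)}; equivalence of the return values is proved on Lx ≠ 0 ∧ Ly ≠ 0.

-- ===== PORT A =====
-- helper h(x, y, Lx)
def hEdge (x y Lx : Int) : Int := y * Lx + PySem.Int.mod x Lx
-- helper v(x, y, Lx, Ly)
def vEdge (x y Lx Ly : Int) : Int := Lx * Ly + PySem.Int.mod y Ly * Lx + PySem.Int.mod x Lx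
-- helper vi(x, y, Lx)
def viIdx (x y Lx : Int) : Int := y * Lx + PySem.Int.mod x Lx

-- helper klein_star: the edges list with its conditional append, then list(set(edges))
def klein_star (x y Lx Ly delta : Int) : List Int :=
  PySem.Set.ofList
    ([hEdge x y Lx, hEdge (x - 1) y Lx, vEdge x y Lx Ly] ++
      (if y = 0 then [vEdge (PySem.Int.mod (Lx - 1 - x + delta) Lx) (Ly - 1) Lx Ly]
       else [vEdge x (y - 1) Lx Ly]))

def predicted_pattern (Lx : Int) (Ly : Int) (delta : Int) : String × List Int × Int :=
  let anti_x := PySem.Int.mod (Lx - 1 - 0 + delta) Lx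
  let prep_edge := vEdge anti_x (Ly - 1) Lx Ly
  let firing := (PySem.List.pyRange 0 Ly).foldl (fun acc y =>
    (PySem.List.pyRange 0 Lx).foldl (fun acc x =>
      if prep_edge ∈ klein_star x y Lx Ly delta then acc ++ [viIdx x y Lx] else acc) acc) []
  -- [0]*(Lx*Ly): Int.toNat clamps a negative count to 0 exactly as Python's list repetition does
  let bits : List Int := List.replicate (Lx * Ly).toNat 0
  let bits := firing.foldl (fun bits idx => PySem.List.pySetD bits idx 1) bits
  let pattern := PySem.Str.join "" (bits.reverse.map PySem.Int.toStr)
  (pattern, PySem.List.sorted firing (fun x => x), prep_edge)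

-- ===== PORT B =====
def predicted_pattern_alt (Lx : Int) (Ly : Int) (delta : Int) : String × List Int × Int :=
  let anti_x := PySem.Int.mod (Lx - 1 + delta) Lx
  let prep_edge := vEdge anti_x (Ly - 1) Lx Ly
  let firing := if 1 ≤ Lx ∧ 1 ≤ Ly then
      PySem.List.sorted (PySem.Set.ofList [0, (Ly - 1) * Lx + anti_x]) (fun x => x)
    else ([] : List Int)
  let bits : List Int := List.replicate (Lx * Ly).toNat 0
  let bits := firing.foldl (fun bits idx => PySem.List.pySetD bits idx 1) bits
  let pattern := PySem.Str.join "" (bits.reverse.map PySem.Int.toStr)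
  (pattern, firing, prep_edge)

-- ===== PRECONDITION & SPEC =====
-- Python A raises ZeroDivisionError (modulo by zero inside v) exactly when Lx = 0 or Ly = 0.
def Pre_predicted_pattern (Lx : Int) (Ly : Int) (delta : Int) : Prop := Lx ≠ 0 ∧ Ly ≠ 0
instance (Lx : Int) (Ly : Int) (delta : Int) : Decidable (Pre_predicted_pattern Lx Ly delta) := by unfold Pre_predicted_pattern; infer_instance
def pvWitness_predicted_pattern : Int × Int × Int := (3, 2, 1)

def Spec_predicted_pattern (Lx : Int) (Ly : Int) (delta : Int) (out : String × List Int × Int) : Prop := out = predicted_pattern_alt Lx Ly delta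
instance (Lx : Int) (Ly : Int) (delta : Int) (out : String × List Int × Int) : Decidable (Spec_predicted_pattern Lx Ly delta out) := by unfold Spec_predicted_pattern; infer_instance

-- ===== CLAIM (what is proved, stated in full; the proofs are below) =====
def Claim_equal_predicted_pattern : Prop := ∀ (Lx : Int) (Ly : Int) (delta : Int), Dom_predicted_pattern Lx Ly delta → Pre_predicted_pattern Lx Ly delta → Spec_predicted_pattern Lx Ly delta (predicted_pattern Lx Ly delta)

-- ===== LEMMAS AND PROOFS =====

-- uniqueness of the (row, column) decomposition of an edge index
lemma decomp_unique {L a b y1 y2 : Int} (hL : 0 < L) (ha : 0 ≤ a) (ha' : a < L)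
    (hb : 0 ≤ b) (hb' : b < L) (h : y1 * L + a = y2 * L + b) : y1 = y2 ∧ a = b := by
  have hd : L ∣ (b - a) := ⟨y1 - y2, by linear_combination -h⟩
  have h0 : b - a = 0 := Int.eq_zero_of_abs_lt_dvd hd (by rw [abs_lt]; omega)
  have hab : a = b := by omega
  refine ⟨?_, hab⟩
  have : y1 * L = y2 * L := by omega
  exact mul_right_cancel₀ (ne_of_gt hL) this

-- which vertices of the grid see the preparation edge
lemma mem_star (Lx Ly delta x y : Int) (hLx : 0 < Lx) (hLy : 0 < Ly)
    (hx : 0 ≤ x) (hx' : x < Lx) (hy : 0 ≤ y) (hy' : y < Ly) :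
    vEdge (PySem.Int.mod (Lx - 1 - 0 + delta) Lx) (Ly - 1) Lx Ly ∈ klein_star x y Lx Ly delta ↔
      (y = Ly - 1 ∧ x = (Lx - 1 + delta) % Lx) ∨ (y = 0 ∧ x = 0) := by
  have e0 : Lx - 1 - 0 + delta = Lx - 1 + delta := by ring
  set A := (Lx - 1 + delta) % Lx with hA
  have hA0 : 0 ≤ A := Int.emod_nonneg _ (by omega)
  have hA1 : A < Lx := Int.emod_lt_of_pos _ hLx
  have hmx : x % Lx = x := Int.emod_eq_of_lt hx hx'
  have hmy : y % Ly = y := Int.emod_eq_of_lt hy hy'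
  have hmL : (Ly - 1) % Ly = Ly - 1 := Int.emod_eq_of_lt (by omega) (by omega)
  have hmA : A % Lx = A := Int.emod_eq_of_lt hA0 hA1
  have hx1a : 0 ≤ (x - 1) % Lx := Int.emod_nonneg _ (by omega)
  have hx1b : (x - 1) % Lx < Lx := Int.emod_lt_of_pos _ hLx
  have hnn : 0 ≤ (Ly - 1) * Lx := mul_nonneg (by omega) (by omega)
  have hyb : y * Lx ≤ (Ly - 1) * Lx := mul_le_mul_of_nonneg_right (by omega) (by omega)
  simp only [klein_star, PySem.Set.mem_ofList, vEdge, hEdge, e0,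
    PySem.Int.mod_eq_emod_of_pos hLx, PySem.Int.mod_eq_emod_of_pos hLy,
    List.mem_append, List.mem_cons, List.not_mem_nil, or_false]
  rw [hmx, hmy, hmL, hmA]
  constructor
  · rintro ((h1 | h2 | h3) | h4)
    · exfalso; linarith
    · exfalso; linarith
    · have := decomp_unique hLx hA0 hA1 hx hx' (by linarith : (Ly - 1) * Lx + A = y * Lx + x)
      exact Or.inl ⟨this.1.symm, this.2.symm⟩
    · by_cases h0 : y = 0
      · rw [if_pos h0, List.mem_singleton, Int.emod_emod_of_dvd _ dvd_rfl] at h4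
        have hax : (Lx - 1 + delta) % Lx = (Lx - 1 - x + delta) % Lx := by rw [← hA]; linarith
        have hdvd : Lx ∣ x := by
          have h5 := Int.emod_eq_emod_iff_emod_sub_eq_zero.mp hax
          have h6 : Lx ∣ (Lx - 1 + delta) - (Lx - 1 - x + delta) := Int.dvd_of_emod_eq_zero h5
          simpa using h6
        have hx0 : x = 0 := by
          rcases hdvd with ⟨k, rfl⟩
          have hk0 : 0 ≤ k := by nlinarith
          have hk1 : k < 1 := by nlinarith
          have : k = 0 := by omega
          simp [this]
        exact Or.inr ⟨h0, hx0⟩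
      · rw [if_neg h0] at h4
        have hmy1 : (y - 1) % Ly = y - 1 := Int.emod_eq_of_lt (by omega) (by omega)
        rw [List.mem_singleton, hmy1] at h4
        have := decomp_unique hLx hA0 hA1 hx hx' (by linarith : (Ly - 1) * Lx + A = (y - 1) * Lx + x)
        exfalso; omega
  · rintro (⟨rfl, rfl⟩ | ⟨rfl, rfl⟩)
    · exact Or.inl (Or.inr (Or.inr rfl))
    · refine Or.inr ?_
      rw [if_pos rfl, List.mem_singleton, Int.emod_emod_of_dvd _ dvd_rfl]
      have : (Lx - 1 - 0 + delta) % Lx = A := by rw [hA]; ring_nf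
      rw [this]

-- the double loop collects exactly map-of-filter over the two ranges
lemma firing_flatMap (Lx Ly delta pe : Int) :
    (PySem.List.pyRange 0 Ly).foldl (fun acc y =>
      (PySem.List.pyRange 0 Lx).foldl (fun acc x =>
        if pe ∈ klein_star x y Lx Ly delta then acc ++ [viIdx x y Lx] else acc) acc) []
    = (PySem.List.pyRange 0 Ly).flatMap (fun y =>
        ((PySem.List.pyRange 0 Lx).filter (fun x => decide (pe ∈ klein_star x y Lx Ly delta))).map
          (fun x => viIdx x y Lx)) := by
  have hfun : (fun (acc : List Int) (y : Int) =>
      (PySem.List.pyRange 0 Lx).foldl (fun acc x =>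
        if pe ∈ klein_star x y Lx Ly delta then acc ++ [viIdx x y Lx] else acc) acc)
    = (fun acc y => acc ++ ((PySem.List.pyRange 0 Lx).filter
        (fun x => decide (pe ∈ klein_star x y Lx Ly delta))).map (fun x => viIdx x y Lx)) := by
    funext acc y
    have := PySem.List.foldl_append_if (fun x => decide (pe ∈ klein_star x y Lx Ly delta))
      (fun x => viIdx x y Lx) (PySem.List.pyRange 0 Lx) acc
    simpa using this
  rw [hfun, PySem.List.foldl_append_eq_flatMap]
  simp

-- picking one element out of a range by filtering
lemma filter_eq_single {a b c : Int} (h1 : a ≤ c) (h2 : c < b) :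
    (PySem.List.pyRange a b).filter (fun x => decide (x = c)) = [c] := by
  rw [List.filter_eq c, List.count_eq_one_of_mem (PySem.List.nodup_pyRange_one a b)
    (PySem.List.mem_pyRange_one.mpr ⟨h1, h2⟩)]
  rfl

-- picking {0, c} out of a range by filtering
lemma filter_pair {c : Int} (n : Int) (hc : 0 < c) (hc' : c < n) :
    (PySem.List.pyRange 0 n).filter (fun x => decide (x = c ∨ x = 0)) = [0, c] := by
  rw [PySem.List.pyRange_one_append 0 c n (by omega) (by omega), List.filter_append]
  have h1 : (PySem.List.pyRange 0 c).filter (fun x => decide (x = c ∨ x = 0)) = [0] := by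
    rw [List.filter_congr (fun x hx => ?_), filter_eq_single (le_refl 0) hc]
    have := PySem.List.mem_pyRange_one.mp hx
    simp only [decide_eq_decide]
    omega
  have h2 : (PySem.List.pyRange c n).filter (fun x => decide (x = c ∨ x = 0)) = [c] := by
    rw [List.filter_congr (fun x hx => ?_), filter_eq_single (le_refl c) hc']
    have := PySem.List.mem_pyRange_one.mp hx
    simp only [decide_eq_decide]
    omega
  rw [h1, h2]
  rfl

-- the loop's firing list, before sorting, in closed form (positive grid)
lemma firingA_closed (Lx Ly delta : Int) (hLx : 0 < Lx) (hLy : 0 < Ly) :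
    (PySem.List.pyRange 0 Ly).foldl (fun acc y =>
      (PySem.List.pyRange 0 Lx).foldl (fun acc x =>
        if vEdge (PySem.Int.mod (Lx - 1 - 0 + delta) Lx) (Ly - 1) Lx Ly ∈ klein_star x y Lx Ly delta
        then acc ++ [viIdx x y Lx] else acc) acc) []
    = if (Ly - 1) * Lx + (Lx - 1 + delta) % Lx = 0 then [0]
      else [0, (Ly - 1) * Lx + (Lx - 1 + delta) % Lx] := by
  obtain ⟨A, hA⟩ : ∃ A, (Lx - 1 + delta) % Lx = A := ⟨_, rfl⟩
  rw [hA]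
  have hA0 : 0 ≤ A := hA ▸ Int.emod_nonneg _ (by omega)
  have hA1 : A < Lx := hA ▸ Int.emod_lt_of_pos _ hLx
  have hviA : ∀ y : Int, viIdx A y Lx = y * Lx + A := by
    intro y
    simp [viIdx, PySem.Int.mod_eq_emod_of_pos hLx, Int.emod_eq_of_lt hA0 hA1]
  have hvi0 : ∀ y : Int, viIdx 0 y Lx = y * Lx := by
    intro y
    simp [viIdx, PySem.Int.mod_eq_emod_of_pos hLx]
  rw [firing_flatMap]
  have hstep : (PySem.List.pyRange 0 Ly).flatMap (fun y =>
      ((PySem.List.pyRange 0 Lx).filter (fun x =>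
        decide (vEdge (PySem.Int.mod (Lx - 1 - 0 + delta) Lx) (Ly - 1) Lx Ly ∈
          klein_star x y Lx Ly delta))).map (fun x => viIdx x y Lx))
    = (PySem.List.pyRange 0 Ly).flatMap (fun y =>
      ((PySem.List.pyRange 0 Lx).filter (fun x =>
        decide (y = Ly - 1 ∧ x = A ∨ y = 0 ∧ x = 0))).map (fun x => viIdx x y Lx)) := by
    refine List.flatMap_congr (fun y hy => ?_)
    refine congrArg (List.map _) (List.filter_congr (fun x hx => ?_))
    have hyb := PySem.List.mem_pyRange_one.mp hy
    have hxb := PySem.List.mem_pyRange_one.mp hx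
    exact decide_eq_decide.mpr
      (hA ▸ mem_star Lx Ly delta x y hLx hLy hxb.1 hxb.2 hyb.1 hyb.2)
  rw [hstep]
  have hr01 : PySem.List.pyRange 0 1 = [0] := by
    have := PySem.List.pyRange_one_singleton (0 : Int)
    simpa using this
  by_cases hLy1 : Ly = 1
  · subst hLy1
    rw [hr01, List.flatMap_singleton]
    rw [show ((1 : Int) - 1) * Lx + A = A from by ring]
    by_cases hA00 : A = 0
    · rw [List.filter_congr (q := fun x => decide (x = 0)) (fun x hx => by
        simp only [decide_eq_decide, true_and]
        have := PySem.List.mem_pyRange_one.mp hx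
        omega), filter_eq_single (le_refl 0) hLx]
      rw [if_pos hA00]
      simp [hvi0]
    · rw [List.filter_congr (q := fun x => decide (x = A ∨ x = 0)) (fun x hx => by
        simp only [decide_eq_decide, true_and]
        omega), filter_pair Lx (by omega) hA1]
      rw [if_neg hA00]
      simp only [List.map_cons, List.map_nil, hvi0, hviA]
      norm_num
  · -- Ly ≥ 2
    have hLy2 : 2 ≤ Ly := by omega
    have hlastr : PySem.List.pyRange (Ly - 1) Ly = [Ly - 1] := by
      have := PySem.List.pyRange_one_singleton (Ly - 1)
      rw [show Ly - 1 + 1 = Ly by ring] at this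
      exact this
    have hsplit : PySem.List.pyRange 0 Ly =
        [0] ++ (PySem.List.pyRange 1 (Ly - 1) ++ [Ly - 1]) := by
      rw [PySem.List.pyRange_one_append 0 1 Ly (by omega) (by omega),
        PySem.List.pyRange_one_append 1 (Ly - 1) Ly (by omega) (by omega), hr01, hlastr]
    rw [hsplit, List.flatMap_append, List.flatMap_append, List.flatMap_singleton,
      List.flatMap_singleton]
    have hrow0 : ((PySem.List.pyRange 0 Lx).filter (fun x =>
        decide ((0 : Int) = Ly - 1 ∧ x = A ∨ (0 : Int) = 0 ∧ x = 0))).map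
          (fun x => viIdx x 0 Lx) = [0] := by
      rw [List.filter_congr (q := fun x => decide (x = 0)) (fun x hx => by
        simp only [decide_eq_decide, true_and]
        omega), filter_eq_single (le_refl 0) hLx]
      simp [hvi0]
    have hmid : (List.flatMap (fun y =>
        ((PySem.List.pyRange 0 Lx).filter (fun x => decide (y = Ly - 1 ∧ x = A ∨ y = 0 ∧ x = 0))).map
          (fun x => viIdx x y Lx)) (PySem.List.pyRange 1 (Ly - 1))) = [] := by
      rw [List.flatMap_eq_nil_iff]
      intro y hy
      have hyb := PySem.List.mem_pyRange_one.mp hy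
      rw [List.filter_eq_nil_iff.mpr (fun x _ => by
        simp only [decide_eq_true_eq]
        omega)]
      rfl
    have hlast : ((PySem.List.pyRange 0 Lx).filter (fun x =>
        decide (Ly - 1 = Ly - 1 ∧ x = A ∨ Ly - 1 = 0 ∧ x = 0))).map
          (fun x => viIdx x (Ly - 1) Lx) = [(Ly - 1) * Lx + A] := by
      rw [List.filter_congr (q := fun x => decide (x = A)) (fun x hx => by
        simp only [decide_eq_decide, true_and]
        omega), filter_eq_single hA0 hA1]
      simp [hviA]
    rw [hrow0, hmid, hlast]
    have hpos : 0 < (Ly - 1) * Lx := mul_pos (by omega) hLx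
    rw [if_neg (by omega)]
    rfl

-- B's firing list in the same closed form (positive grid)
lemma firingB_closed (Lx Ly delta : Int) (hLx : 0 < Lx) (hLy : 0 < Ly) :
    PySem.List.sorted (PySem.Set.ofList [0, (Ly - 1) * Lx + PySem.Int.mod (Lx - 1 + delta) Lx]) (fun x => x)
    = if (Ly - 1) * Lx + (Lx - 1 + delta) % Lx = 0 then [0]
      else [0, (Ly - 1) * Lx + (Lx - 1 + delta) % Lx] := by
  rw [PySem.Int.mod_eq_emod_of_pos hLx]
  have hm0' : 0 ≤ (Ly - 1) * Lx + (Lx - 1 + delta) % Lx := by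
    have h1 : 0 ≤ (Ly - 1) * Lx := mul_nonneg (by omega) (by omega)
    have h2 : 0 ≤ (Lx - 1 + delta) % Lx := Int.emod_nonneg _ (by omega)
    omega
  obtain ⟨m, hm⟩ : ∃ m, (Ly - 1) * Lx + (Lx - 1 + delta) % Lx = m := ⟨_, rfl⟩
  rw [hm]
  have hm0 : 0 ≤ m := hm ▸ hm0'
  have hofList : PySem.Set.ofList [(0 : Int), m] = if m = 0 then [0] else [0, m] := by
    by_cases h : m = 0 <;> simp [PySem.Set.ofList, h]
  rw [hofList]
  by_cases h : m = 0
  · simp only [if_pos h]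
    rfl
  · simp only [if_neg h]
    exact PySem.List.sorted_id_eq_of_perm_of_pairwise _ _ (List.Perm.refl _) (by simp [hm0])

-- the sorted firing list is the firing list itself
lemma sorted_closed (m : Int) (hm : 0 ≤ m) :
    PySem.List.sorted (if m = 0 then [(0 : Int)] else [0, m]) (fun x => x)
    = if m = 0 then [(0 : Int)] else [0, m] := by
  by_cases h : m = 0
  · simp only [if_pos h]; rfl
  · simp only [if_neg h]
    exact PySem.List.sorted_id_eq_of_perm_of_pairwise _ _ (List.Perm.refl _) (by simp [hm])

-- ===== VERDICT (by name: the statement is the Claim_ definition above) =====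
theorem predicted_pattern_spec : Claim_equal_predicted_pattern := by
  intro Lx Ly delta _ hpre
  obtain ⟨hLx0, hLy0⟩ := hpre
  unfold Spec_predicted_pattern predicted_pattern predicted_pattern_alt
  show (PySem.Str.join "" (List.map PySem.Int.toStr
        (List.foldl (fun bits idx => PySem.List.pySetD bits idx 1)
          (List.replicate (Lx * Ly).toNat 0)
          ((PySem.List.pyRange 0 Ly).foldl (fun acc y =>
            (PySem.List.pyRange 0 Lx).foldl (fun acc x =>
              if vEdge (PySem.Int.mod (Lx - 1 - 0 + delta) Lx) (Ly - 1) Lx Ly ∈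
                  klein_star x y Lx Ly delta
              then acc ++ [viIdx x y Lx] else acc) acc) [])).reverse),
      PySem.List.sorted ((PySem.List.pyRange 0 Ly).foldl (fun acc y =>
            (PySem.List.pyRange 0 Lx).foldl (fun acc x =>
              if vEdge (PySem.Int.mod (Lx - 1 - 0 + delta) Lx) (Ly - 1) Lx Ly ∈
                  klein_star x y Lx Ly delta
              then acc ++ [viIdx x y Lx] else acc) acc) []) (fun x => x),
      vEdge (PySem.Int.mod (Lx - 1 - 0 + delta) Lx) (Ly - 1) Lx Ly)
    = (PySem.Str.join "" (List.map PySem.Int.toStr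
        (List.foldl (fun bits idx => PySem.List.pySetD bits idx 1)
          (List.replicate (Lx * Ly).toNat 0)
          (if 1 ≤ Lx ∧ 1 ≤ Ly then
            PySem.List.sorted (PySem.Set.ofList
              [0, (Ly - 1) * Lx + PySem.Int.mod (Lx - 1 + delta) Lx]) (fun x => x)
          else [])).reverse),
      (if 1 ≤ Lx ∧ 1 ≤ Ly then
        PySem.List.sorted (PySem.Set.ofList
          [0, (Ly - 1) * Lx + PySem.Int.mod (Lx - 1 + delta) Lx]) (fun x => x)
      else []),
      vEdge (PySem.Int.mod (Lx - 1 + delta) Lx) (Ly - 1) Lx Ly)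
  have e0 : Lx - 1 - 0 + delta = Lx - 1 + delta := by ring
  by_cases hpos : 0 < Lx ∧ 0 < Ly
  · obtain ⟨hLx, hLy⟩ := hpos
    have hm0 : 0 ≤ (Ly - 1) * Lx + (Lx - 1 + delta) % Lx := by
      have h1 : 0 ≤ (Ly - 1) * Lx := mul_nonneg (by omega) (by omega)
      have h2 : 0 ≤ (Lx - 1 + delta) % Lx := Int.emod_nonneg _ (by omega)
      omega
    have hp : 1 ≤ Lx ∧ 1 ≤ Ly := ⟨by omega, by omega⟩
    rw [firingA_closed Lx Ly delta hLx hLy, if_pos hp,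
      firingB_closed Lx Ly delta hLx hLy, sorted_closed _ hm0, e0]
  · have hfalse : ¬(1 ≤ Lx ∧ 1 ≤ Ly) := by omega
    rw [firing_flatMap, if_neg hfalse, e0]
    have hnil : (PySem.List.pyRange 0 Ly).flatMap (fun y =>
        ((PySem.List.pyRange 0 Lx).filter
          (fun x => decide (vEdge (PySem.Int.mod (Lx - 1 + delta) Lx) (Ly - 1) Lx Ly ∈
            klein_star x y Lx Ly delta))).map (fun x => viIdx x y Lx)) = [] := by
      rcases (by omega : Lx ≤ 0 ∨ Ly ≤ 0) with h | h
      · rw [List.flatMap_eq_nil_iff]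
        intro y _
        rw [PySem.List.pyRange_one_eq_nil h]
        rfl
      · rw [PySem.List.pyRange_one_eq_nil h]
        rfl
    rw [hnil]
    rfl
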